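-- pv_equiv track=rewrite | github.com/kornyellow/kmitl-odds | lab-4/item_5.py | use_item
-- ===== SOURCE A (Python) =====
-- def use_item(candy, item):
--     failed = 0
--     i = 0
--     while i < len(candy):
--         piece = candy[i]
--         matches = 1
--         for j in range(1, 3):
--             if i+j >= len(candy):
--                 break
--             elif candy[i+j] != piece:
--                 break
--             else:
--                 matches += 1
--         if matches == 3 and len(item) != 0:
--             a = item.pop()
--             candy.insert(i+2, a)
--             i += 2
--             if a == piece:
--                 failed += 1
--         elif len(item) == 0:
--             break
--         i += 1
--     return candy, failed
-- ===== SOURCE B (Python) =====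
-- def use_item(candy, item):
--     # Run-length encode the original candy, then emit each run with items
--     # spliced in after every second element while matches and items remain.
--     runs = []
--     for v in candy:
--         if runs and runs[-1][0] == v:
--             runs[-1][1] += 1
--         else:
--             runs.append([v, 1])
--     failed = 0
--     out = []
--     for v, length in runs:
--         while length >= 3 and item:
--             a = item.pop()
--             out += [v, v, a]
--             if a == v:
--                 failed += 1
--             length -= 2
--         out += [v] * length
--     candy[:] = out
--     return candy, failed
-- ===== Notes on version B (the rewrite author's own statement) =====
-- stated objective: faster
-- what changed: Replaces the index-driven in-place scan (repeated O(n) list.insert and re-indexing) by a run-length encoding of candy followed by per-run emission of matched triples with popped items spliced in, building the output list once.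
import Mathlib
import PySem

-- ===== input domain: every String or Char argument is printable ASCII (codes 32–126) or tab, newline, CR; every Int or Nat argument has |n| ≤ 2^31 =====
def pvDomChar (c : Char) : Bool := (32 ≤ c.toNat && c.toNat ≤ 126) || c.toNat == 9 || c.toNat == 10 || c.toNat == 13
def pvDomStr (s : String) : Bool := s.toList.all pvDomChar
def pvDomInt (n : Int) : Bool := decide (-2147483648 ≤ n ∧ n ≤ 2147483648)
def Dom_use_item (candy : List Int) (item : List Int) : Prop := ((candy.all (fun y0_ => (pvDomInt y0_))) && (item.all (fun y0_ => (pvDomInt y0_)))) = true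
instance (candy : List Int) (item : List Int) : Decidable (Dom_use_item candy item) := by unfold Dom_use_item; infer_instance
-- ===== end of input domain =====

-- B replaces A's index-driven in-place scan (repeated list.insert) by a run-length
-- encoding of candy followed by per-run emission, building the output once (faster).
-- Both Pythons mutate candy and item identically; the equivalence proved is about the
-- return value (which contains the final candy).

-- ===== PORT A =====
-- Loop state: (candy, i, failed), threading item; `item.pop()` via PySem.List.pop? (-1),
-- `candy.insert(i+2, a)` via PySem.List.insert.
def useItemLoop (candy : List Int) (item : List Int) (i : Nat) (failed : Int) :
    List Int × List Int × Int :=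
  if h : i < candy.length then
    let piece := candy[i]!
    let matchCnt : Nat :=
      if i + 1 < candy.length ∧ candy[i+1]! = piece then
        if i + 2 < candy.length ∧ candy[i+2]! = piece then 3 else 2
      else 1
    if matchCnt = 3 ∧ item ≠ [] then
      let p := (PySem.List.pop? item (-1)).getD (0, [])
      let candy' := PySem.List.insert candy (Int.ofNat (i+2)) p.1
      let failed' := if p.1 = piece then failed + 1 else failed
      useItemLoop candy' p.2 (i+3) failed'
    else if item = [] then (candy, item, failed)
    else useItemLoop candy item (i+1) failed
  else (candy, item, failed)
termination_by 2 * candy.length - i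
decreasing_by
  · simp only [PySem.List.length_insert]; omega
  · omega

def use_item (candy : List Int) (item : List Int) : List Int × Int :=
  let r := useItemLoop candy item 0 0
  (r.1, r.2.2)

-- ===== PORT B =====
-- run-length encoding step: Python's `if runs and runs[-1][0]==v: runs[-1][1]+=1 else append`
def rleStep (runs : List (Int × Nat)) (v : Int) : List (Int × Nat) :=
  match runs.getLast? with
  | some p => if p.1 = v then runs.dropLast ++ [(p.1, p.2 + 1)] else runs ++ [(v, 1)]
  | none => [(v, 1)]

def rle (candy : List Int) : List (Int × Nat) := candy.foldl rleStep []

-- the inner `while length >= 3 and item` loop of one run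
def emitRun (v : Int) (len : Nat) (item : List Int) (out : List Int) (failed : Int) :
    List Int × List Int × Int :=
  if 3 ≤ len ∧ item ≠ [] then
    let p := (PySem.List.pop? item (-1)).getD (0, [])
    emitRun v (len - 2) p.2 (out ++ [v, v, p.1]) (if p.1 = v then failed + 1 else failed)
  else (out ++ List.replicate len v, item, failed)
termination_by len
decreasing_by omega

def use_item_alt (candy : List Int) (item : List Int) : List Int × Int :=
  let r := (rle candy).foldl (fun s p => emitRun p.1 p.2 s.2.1 s.1 s.2.2) ([], item, 0)
  (r.1, r.2.2)

-- ===== PRECONDITION & SPEC =====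
def Spec_use_item (candy : List Int) (item : List Int) (out : List Int × Int) : Prop := out = use_item_alt candy item
instance (candy : List Int) (item : List Int) (out : List Int × Int) : Decidable (Spec_use_item candy item out) := by unfold Spec_use_item; infer_instance

-- ===== CLAIM (what is proved, stated in full; the proofs are below) =====
def Claim_equal_use_item : Prop := ∀ (candy : List Int) (item : List Int), Dom_use_item candy item → Spec_use_item candy item (use_item candy item)

-- ===== LEMMAS AND PROOFS =====

-- bridge: pure recursion over the remaining suffix, to which both ports are reduced
def bridgeP (rest : List Int) (item : List Int) (failed : Int) : List Int × List Int × Int :=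
  match rest with
  | [] => ([], item, failed)
  | x :: y :: z :: rs' =>
    if item = [] then (x :: y :: z :: rs', item, failed)
    else if y = x ∧ z = x then
      let a := item.getLast!
      let r := bridgeP (x :: rs') item.dropLast (if a = x then failed + 1 else failed)
      (x :: x :: a :: r.1, r.2)
    else
      let r := bridgeP (y :: z :: rs') item failed
      (x :: r.1, r.2)
  | x :: rs =>
    if item = [] then (x :: rs, item, failed)
    else
      let r := bridgeP rs item failed
      (x :: r.1, r.2)
termination_by rest.length
decreasing_by all_goals simp

lemma pop_fst (it : List Int) (h : it ≠ []) :
    ((PySem.List.pop? it (-1)).getD (0, [])).1 = it.getLast! := by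
  induction it using List.reverseRecOn with
  | nil => exact absurd rfl h
  | append_singleton ys y _ => rw [PySem.List.pop?_last]; simp

lemma pop_snd (it : List Int) (h : it ≠ []) :
    ((PySem.List.pop? it (-1)).getD (0, [])).2 = it.dropLast := by
  induction it using List.reverseRecOn with
  | nil => exact absurd rfl h
  | append_singleton ys y _ => rw [PySem.List.pop?_last]; simp

lemma getBang_append (pre l : List Int) (k : Nat) : (pre ++ l)[pre.length + k]! = l[k]! := by
  rw [List.getElem!_eq_getElem?_getD, List.getElem!_eq_getElem?_getD,
    List.getElem?_append_right (by omega)]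
  simp

lemma getBang0 (pre : List Int) (x : Int) (rs : List Int) : (pre ++ x :: rs)[pre.length]! = x := by
  have h := getBang_append pre (x :: rs) 0
  simpa using h

lemma getBang1 (pre : List Int) (x y : Int) (rs : List Int) :
    (pre ++ x :: y :: rs)[pre.length + 1]! = y := by
  have h := getBang_append pre (x :: y :: rs) 1
  simpa using h

lemma getBang2 (pre : List Int) (x y z : Int) (rs : List Int) :
    (pre ++ x :: y :: z :: rs)[pre.length + 2]! = z := by
  have h := getBang_append pre (x :: y :: z :: rs) 2
  simpa using h

lemma insert_mid (pre : List Int) (x a : Int) (rs : List Int) :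
    PySem.List.insert (pre ++ x :: x :: x :: rs) (Int.ofNat (pre.length + 2)) a =
      (pre ++ [x, x, a]) ++ x :: rs := by
  have h : (Int.ofNat (pre.length + 2)) = ((pre.length + 2 : Nat) : Int) := rfl
  rw [h, PySem.List.insert_natCast _ _ _ (by simp)]
  rw [List.take_append, List.drop_append]
  rw [List.take_of_length_le (by omega), List.drop_of_length_le (by omega)]
  simp

lemma useItemLoop_stop (c it : List Int) (i : Nat) (f : Int) (h : c.length ≤ i) :
    useItemLoop c it i f = (c, it, f) := by
  rw [useItemLoop, dif_neg (by omega)]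

lemma bridgeP_nil (it : List Int) (f : Int) : bridgeP [] it f = ([], it, f) := by
  rw [bridgeP]

lemma bridgeP_one (x : Int) (it : List Int) (f : Int) : bridgeP [x] it f = ([x], it, f) := by
  by_cases hit : it = [] <;> simp [bridgeP, hit]

lemma bridgeP_two (x y : Int) (it : List Int) (f : Int) : bridgeP [x, y] it f = ([x, y], it, f) := by
  by_cases hit : it = [] <;> simp [bridgeP, hit]

lemma bridgeP_empty_item (rest : List Int) (f : Int) : bridgeP rest [] f = (rest, [], f) := by
  match rest with
  | [] => rw [bridgeP]
  | [x] => exact bridgeP_one x [] f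
  | [x, y] => exact bridgeP_two x y [] f
  | x :: y :: z :: rs' => simp [bridgeP]

lemma bridgeP_triple (x : Int) (rs' it : List Int) (f : Int) (hit : it ≠ []) :
    bridgeP (x :: x :: x :: rs') it f =
      (x :: x :: it.getLast! ::
        (bridgeP (x :: rs') it.dropLast (if it.getLast! = x then f + 1 else f)).1,
       (bridgeP (x :: rs') it.dropLast (if it.getLast! = x then f + 1 else f)).2) := by
  simp [bridgeP, hit]

lemma bridgeP_nontriple (x y z : Int) (rs' it : List Int) (f : Int) (hit : it ≠ [])
    (htr : ¬ (y = x ∧ z = x)) :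
    bridgeP (x :: y :: z :: rs') it f =
      (x :: (bridgeP (y :: z :: rs') it f).1, (bridgeP (y :: z :: rs') it f).2) := by
  simp [bridgeP, hit, htr]

theorem loopA_eq_bridge (rest item : List Int) (failed : Int) (pre : List Int) :
    useItemLoop (pre ++ rest) item pre.length failed =
      (pre ++ (bridgeP rest item failed).1, (bridgeP rest item failed).2) := by
  match rest with
  | [] =>
    rw [bridgeP_nil, useItemLoop_stop _ _ _ _ (by simp)]
  | x :: rs =>
    rw [useItemLoop]
    have hlt : pre.length < (pre ++ x :: rs).length := by simp
    rw [dif_pos hlt]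
    simp only [getBang0]
    by_cases hit : item = []
    · subst hit
      rw [bridgeP_empty_item]
      have hm : ¬ ((if pre.length + 1 < (pre ++ x :: rs).length ∧ (pre ++ x :: rs)[pre.length + 1]! = x then
            if pre.length + 2 < (pre ++ x :: rs).length ∧ (pre ++ x :: rs)[pre.length + 2]! = x then 3 else 2
          else 1) = 3 ∧ ([] : List Int) ≠ []) := by simp
      rw [if_neg hm]
      simp
    · match rs with
      | [] =>
        have hc1 : ¬ (pre.length + 1 < (pre ++ [x]).length ∧ (pre ++ [x])[pre.length + 1]! = x) := by
          simp
        rw [if_neg hc1]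
        have hm3 : ¬ ((1 : Nat) = 3 ∧ item ≠ []) := by simp
        rw [if_neg hm3, if_neg hit, bridgeP_one, useItemLoop_stop _ _ _ _ (by simp)]
      | [y] =>
        rw [bridgeP_two]
        have hcont : useItemLoop (pre ++ [x, y]) item (pre.length + 1) failed
            = (pre ++ [x, y], item, failed) := by
          have hrec := loopA_eq_bridge [y] item failed (pre ++ [x])
          rw [bridgeP_one] at hrec
          have hlen : pre.length + 1 = (pre ++ [x]).length := by simp
          have happ : pre ++ [x, y] = (pre ++ [x]) ++ [y] := by simp
          rw [hlen, happ, hrec]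
        by_cases hyx : y = x
        · rw [hyx] at hcont ⊢
          have hc1 : (pre.length + 1 < (pre ++ [x, x]).length ∧ (pre ++ [x, x])[pre.length + 1]! = x) :=
            ⟨by simp, getBang1 pre x x []⟩
          have hc2 : ¬ (pre.length + 2 < (pre ++ [x, x]).length ∧ (pre ++ [x, x])[pre.length + 2]! = x) := by
            simp
          rw [if_pos hc1, if_neg hc2]
          have hm3 : ¬ ((2 : Nat) = 3 ∧ item ≠ []) := by simp
          rw [if_neg hm3, if_neg hit, hcont]
        · have hc1 : ¬ (pre.length + 1 < (pre ++ [x, y]).length ∧ (pre ++ [x, y])[pre.length + 1]! = x) := by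
            rw [getBang1]
            simp [hyx]
          rw [if_neg hc1]
          have hm3 : ¬ ((1 : Nat) = 3 ∧ item ≠ []) := by simp
          rw [if_neg hm3, if_neg hit, hcont]
      | y :: z :: rs' =>
        by_cases htr : y = x ∧ z = x
        · obtain ⟨hy, hz⟩ := htr
          rw [hy, hz]
          rw [bridgeP_triple _ _ _ _ hit]
          have h1 : (pre.length + 1 < (pre ++ x :: x :: x :: rs').length ∧ (pre ++ x :: x :: x :: rs')[pre.length + 1]! = x) :=
            ⟨by simp, getBang1 pre x x (x :: rs')⟩
          have h2 : (pre.length + 2 < (pre ++ x :: x :: x :: rs').length ∧ (pre ++ x :: x :: x :: rs')[pre.length + 2]! = x) :=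
            ⟨by simp, getBang2 pre x x x rs'⟩
          rw [if_pos h1, if_pos h2, if_pos ⟨rfl, hit⟩]
          rw [pop_fst item hit, pop_snd item hit]
          rw [insert_mid pre x item.getLast! rs']
          have hrec := loopA_eq_bridge (x :: rs') item.dropLast
            (if item.getLast! = x then failed + 1 else failed) (pre ++ [x, x, item.getLast!])
          have hlen : pre.length + 3 = (pre ++ [x, x, item.getLast!]).length := by simp
          rw [hlen, hrec]
          simp
        · rw [bridgeP_nontriple _ _ _ _ _ _ hit htr]
          have hm3 : ¬ ((if pre.length + 1 < (pre ++ x :: y :: z :: rs').length ∧ (pre ++ x :: y :: z :: rs')[pre.length + 1]! = x then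
              if pre.length + 2 < (pre ++ x :: y :: z :: rs').length ∧ (pre ++ x :: y :: z :: rs')[pre.length + 2]! = x then 3 else 2
            else 1) = 3 ∧ item ≠ []) := by
            rw [getBang1, getBang2]
            intro hcon
            obtain ⟨hcon, -⟩ := hcon
            by_cases hy : y = x
            · by_cases hz : z = x
              · exact htr (And.intro hy hz)
              · simp [hy, hz] at hcon
            · simp [hy] at hcon
          rw [if_neg hm3, if_neg hit]
          have hrec := loopA_eq_bridge (y :: z :: rs') item failed (pre ++ [x])
          have hlen : pre.length + 1 = (pre ++ [x]).length := by simp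
          have happ : pre ++ x :: y :: z :: rs' = (pre ++ [x]) ++ y :: z :: rs' := by simp
          rw [hlen, happ, hrec]
          simp
termination_by rest.length
decreasing_by all_goals simp

lemma emitRun_step (v : Int) (len : Nat) (item out : List Int) (f : Int)
    (h3 : 3 ≤ len) (hit : item ≠ []) :
    emitRun v len item out f =
      emitRun v (len - 2) item.dropLast (out ++ [v, v, item.getLast!])
        (if item.getLast! = v then f + 1 else f) := by
  rw [emitRun, if_pos ⟨h3, hit⟩]
  simp only [pop_fst item hit, pop_snd item hit]

lemma emitRun_stop (v : Int) (len : Nat) (item out : List Int) (f : Int)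
    (h : ¬ (3 ≤ len ∧ item ≠ [])) :
    emitRun v len item out f = (out ++ List.replicate len v, item, f) := by
  rw [emitRun, if_neg h]

theorem emitRun_out (v : Int) (len : Nat) (item out : List Int) (failed : Int) :
    emitRun v len item out failed =
      (out ++ (emitRun v len item [] failed).1, (emitRun v len item [] failed).2) := by
  by_cases h : 3 ≤ len ∧ item ≠ []
  · rw [emitRun_step v len item out failed h.1 h.2, emitRun_step v len item [] failed h.1 h.2]
    rw [emitRun_out v (len - 2) item.dropLast (out ++ [v, v, item.getLast!]) _,
        emitRun_out v (len - 2) item.dropLast ([] ++ [v, v, item.getLast!]) _]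
    simp
  · rw [emitRun_stop v len item out failed h, emitRun_stop v len item [] failed h]
    simp
termination_by len
decreasing_by all_goals omega

theorem bridge_run (len : Nat) (v : Int) (rest item : List Int) (failed : Int)
    (hne : rest.head? ≠ some v) :
    bridgeP (List.replicate len v ++ rest) item failed =
      ((emitRun v len item [] failed).1 ++
        (bridgeP rest (emitRun v len item [] failed).2.1 (emitRun v len item [] failed).2.2).1,
       (bridgeP rest (emitRun v len item [] failed).2.1 (emitRun v len item [] failed).2.2).2) := by
  by_cases hit : item = []
  · subst hit
    rw [emitRun_stop v len [] [] failed (by simp), bridgeP_empty_item, bridgeP_empty_item]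
    simp
  · by_cases h3 : 3 ≤ len
    · obtain ⟨m, rfl⟩ : ∃ m, len = m + 3 := ⟨len - 3, by omega⟩
      have hrep : List.replicate (m + 3) v = v :: v :: v :: List.replicate m v := by
        simp [List.replicate_succ]
      rw [hrep]
      have hcons : (v :: v :: v :: List.replicate m v) ++ rest
          = v :: v :: v :: (List.replicate m v ++ rest) := by simp
      rw [hcons, bridgeP_triple v (List.replicate m v ++ rest) item failed hit]
      have hrep2 : v :: (List.replicate m v ++ rest) = List.replicate (m + 1) v ++ rest := by
        simp [List.replicate_succ]
      rw [hrep2, bridge_run (m + 1) v rest item.dropLast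
        (if item.getLast! = v then failed + 1 else failed) hne]
      rw [emitRun_step v (m + 3) item [] failed (by omega) hit]
      rw [show m + 3 - 2 = m + 1 from by omega]
      rw [emitRun_out v (m + 1) item.dropLast ([] ++ [v, v, item.getLast!]) _]
      simp
    · rw [emitRun_stop v len item [] failed (by omega)]
      interval_cases len
      · simp
      · match rest, hne with
        | [], _ => simp [bridgeP_one, bridgeP_nil]
        | [w], hne =>
          have hw : w ≠ v := by simpa using hne
          simp [bridgeP_two, bridgeP_one]
        | w :: u :: ws, hne =>
          have hw : w ≠ v := by simpa using hne
          rw [show List.replicate 1 v ++ w :: u :: ws = v :: w :: u :: ws from by simp]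
          rw [bridgeP_nontriple v w u ws item failed hit (by tauto)]
          simp
      · match rest, hne with
        | [], _ => simp [bridgeP_two, bridgeP_nil]
        | [w], hne =>
          have hw : w ≠ v := by simpa using hne
          rw [show List.replicate 2 v ++ [w] = v :: v :: w :: [] from by simp [List.replicate_succ]]
          rw [bridgeP_nontriple v v w [] item failed hit (by tauto)]
          rw [bridgeP_two, bridgeP_one]
          simp
        | w :: u :: ws, hne =>
          have hw : w ≠ v := by simpa using hne
          rw [show List.replicate 2 v ++ w :: u :: ws = v :: v :: w :: u :: ws from by simp [List.replicate_succ]]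
          rw [bridgeP_nontriple v v w (u :: ws) item failed hit (by tauto)]
          rw [bridgeP_nontriple v w u ws item failed hit (by tauto)]
          simp
termination_by len
decreasing_by all_goals omega

def runsWF (runs : List (Int × Nat)) : Prop :=
  (runs.map Prod.fst).IsChain (· ≠ ·) ∧ ∀ p ∈ runs, 1 ≤ p.2

def runsFlat (runs : List (Int × Nat)) : List Int :=
  (runs.map (fun p => List.replicate p.2 p.1)).flatten

lemma runsFlat_nil : runsFlat [] = [] := rfl

lemma runsFlat_cons (p : Int × Nat) (R : List (Int × Nat)) :
    runsFlat (p :: R) = List.replicate p.2 p.1 ++ runsFlat R := by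
  simp [runsFlat]

lemma runsFlat_append (A B : List (Int × Nat)) :
    runsFlat (A ++ B) = runsFlat A ++ runsFlat B := by
  simp [runsFlat]

lemma runsWF_tail (p : Int × Nat) (R : List (Int × Nat)) (h : runsWF (p :: R)) : runsWF R := by
  obtain ⟨h1, h2⟩ := h
  refine ⟨?_, fun q hq => h2 q (List.mem_cons_of_mem _ hq)⟩
  simpa using h1.tail

lemma runsFlat_head_ne (v : Int) (c : Nat) (R : List (Int × Nat)) (h : runsWF ((v, c) :: R)) :
    (runsFlat R).head? ≠ some v := by
  match R with
  | [] => simp [runsFlat_nil]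
  | (v', c') :: R' =>
    have hc' : 1 ≤ c' := h.2 (v', c') (by simp)
    obtain ⟨k, rfl⟩ : ∃ k, c' = k + 1 := ⟨c' - 1, by omega⟩
    have hvv : v ≠ v' := by
      have := h.1
      simp only [List.map_cons] at this
      exact (List.isChain_cons_cons.mp this).1
    rw [runsFlat_cons]
    simp [List.replicate_succ]
    intro hcon
    exact hvv hcon.symm

theorem fold_emit_eq_bridge (runs : List (Int × Nat)) (out item : List Int) (failed : Int)
    (hwf : runsWF runs) :
    runs.foldl (fun s p => emitRun p.1 p.2 s.2.1 s.1 s.2.2) (out, item, failed) =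
      (out ++ (bridgeP (runsFlat runs) item failed).1, (bridgeP (runsFlat runs) item failed).2) := by
  revert hwf
  induction runs generalizing out item failed with
  | nil => intro hwf; simp [runsFlat_nil, bridgeP_nil]
  | cons p R ih =>
    intro hwf
    obtain ⟨v, c⟩ := p
    have hne := runsFlat_head_ne v c R hwf
    have hwfR := runsWF_tail (v, c) R hwf
    simp only [List.foldl_cons]
    rw [runsFlat_cons]
    rw [bridge_run c v (runsFlat R) item failed hne]
    rw [emitRun_out v c item out failed]
    rw [ih (out ++ (emitRun v c item [] failed).1) (emitRun v c item [] failed).2.1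
      (emitRun v c item [] failed).2.2 hwfR]
    simp

theorem rleStep_spec (acc : List (Int × Nat)) (v : Int) (hwf : runsWF acc) :
    runsFlat (rleStep acc v) = runsFlat acc ++ [v] ∧ runsWF (rleStep acc v) := by
  unfold rleStep
  match hl : acc.getLast? with
  | none =>
    have : acc = [] := List.getLast?_eq_none_iff.mp hl
    subst this
    constructor
    · simp [runsFlat]
    · constructor
      · simp
      · intro p hp; simp at hp; simp [hp]
  | some p =>
    obtain ⟨acc', rfl⟩ : ∃ l', acc = l' ++ [p] := List.getLast?_eq_some_iff.mp hl
    have hdrop : (acc' ++ [p]).dropLast = acc' := by simp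
    dsimp only
    by_cases hv : p.1 = v
    · rw [if_pos hv, hdrop]
      constructor
      · rw [runsFlat_append, runsFlat_append, runsFlat_cons, runsFlat_cons]
        simp [List.replicate_succ', hv, List.append_assoc, runsFlat_nil]
      · constructor
        · have := hwf.1
          simpa using this
        · intro q hq
          rcases List.mem_append.mp hq with hq | hq
          · exact hwf.2 q (List.mem_append.mpr (Or.inl hq))
          · simp at hq; simp [hq]
    · rw [if_neg hv]
      constructor
      · rw [runsFlat_append, runsFlat_append, runsFlat_cons]
        simp [runsFlat_cons, runsFlat_nil]
      · constructor
        · rw [List.map_append]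
          refine List.IsChain.append hwf.1 (by simp) ?_
          intro x hx y hy
          rw [List.getLast?_map] at hx
          rw [hl] at hx
          simp at hx hy
          subst hx
          subst hy
          exact hv
        · intro q hq
          rcases List.mem_append.mp hq with hq | hq
          · exact hwf.2 q hq
          · simp at hq; simp [hq]

theorem rle_correct (candy : List Int) :
    runsFlat (rle candy) = candy ∧ runsWF (rle candy) := by
  unfold rle
  suffices h : ∀ acc, runsWF acc → runsFlat (candy.foldl rleStep acc) = runsFlat acc ++ candy ∧ runsWF (candy.foldl rleStep acc) by
    have hwfnil : runsWF [] := by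
      refine ⟨?_, ?_⟩ <;> simp
    have := h [] hwfnil
    simpa [runsFlat_nil] using this
  induction candy with
  | nil => intro acc hwf; exact ⟨by simp, hwf⟩
  | cons v l ih =>
    intro acc hwf
    simp only [List.foldl_cons]
    obtain ⟨h1, h2⟩ := rleStep_spec acc v hwf
    obtain ⟨h3, h4⟩ := ih (rleStep acc v) h2
    rw [h3, h1]
    exact ⟨by simp, h4⟩

-- ===== VERDICT (by name: the statement is the Claim_ definition above) =====
theorem use_item_spec : Claim_equal_use_item := by
  intro candy item _
  unfold Spec_use_item use_item use_item_alt
  obtain ⟨hf, hwf⟩ := rle_correct candy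
  rw [fold_emit_eq_bridge _ _ _ _ hwf, hf]
  have h := loopA_eq_bridge candy item 0 []
  simp only [List.nil_append, List.length_nil] at h ⊢
  rw [h]
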